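-- pv_equiv track=rewrite | github.com/sampathvad/Trove | gen_xcodeproj.py | collect_groups
-- ===== SOURCE A (Python) =====
-- def collect_groups(paths):
--     """Return {dir_path: [child_paths]} from file list."""
--     groups = {}
--     for p in paths:
--         parts = p.split("/")
--         for i in range(1, len(parts)):
--             parent = "/".join(parts[:i])
--             child  = "/".join(parts[:i+1])
--             groups.setdefault(parent, set()).add(child)
--         groups.setdefault(p, set())  # leaf
--     return groups
-- ===== SOURCE B (Python) =====
-- def collect_groups(paths):
--     """Return {dir_path: [child_paths]} from file list."""
--     # Phase 1: index every tree node once, remembering its parent (None for roots).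
--     parents = {}
--     for p in paths:
--         parts = p.split("/")
--         node = parts[0]
--         parents.setdefault(node, None)
--         for part in parts[1:]:
--             child = node + "/" + part
--             parents.setdefault(child, node)
--             node = child
--     # Phase 2: derive the groups dict from the node index.
--     groups = {s: set() for s in parents}
--     for s, par in parents.items():
--         if par is not None:
--             groups[par].add(s)
--     return groups
-- ===== Notes on version B (the rewrite author's own statement) =====
-- stated objective: alternative
-- what changed: B is two-phase: a first pass builds a node-to-parent index of every tree node (running-prefix, no slice/join recomputation), and the groups dict of child sets is then derived from that index in a separate linking pass, instead of A's single interleaved pass that recomputes each parent and child by slicing and '/'-joining while mutating the groups dict.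
import Mathlib
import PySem

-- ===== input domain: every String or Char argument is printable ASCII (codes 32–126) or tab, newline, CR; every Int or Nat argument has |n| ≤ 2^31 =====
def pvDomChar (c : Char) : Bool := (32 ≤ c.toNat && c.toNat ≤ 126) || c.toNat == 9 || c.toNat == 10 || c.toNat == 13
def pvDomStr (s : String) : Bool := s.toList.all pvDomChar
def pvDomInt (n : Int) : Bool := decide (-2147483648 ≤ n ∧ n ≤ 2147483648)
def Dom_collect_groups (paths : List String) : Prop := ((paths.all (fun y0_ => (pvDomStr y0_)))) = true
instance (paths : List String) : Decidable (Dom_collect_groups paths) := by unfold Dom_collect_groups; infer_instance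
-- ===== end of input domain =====

-- B replaces A's single interleaved pass by a two-phase construction: a node->parent index is
-- built first and the groups dict is then derived from it; the return value is proved identical.

-- ===== PORT A =====
-- A builds the groups dict in one interleaved pass, recomputing parent/child by slicing+joining.
-- one step of A's inner loop: groups.setdefault(parent, set()).add(child) with parent/child joined slices
def pvStepA (parts : List String) (g : PySem.Dict String (PySem.Set String)) (i : Int) :
    PySem.Dict String (PySem.Set String) :=
  let parent := PySem.Str.join "/" (PySem.List.slice parts none (some i))
  let child  := PySem.Str.join "/" (PySem.List.slice parts none (some (i + 1)))
  g.modify parent PySem.Set.empty (fun s => PySem.Set.add s child)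

-- body of A's outer loop over paths
def pvPathA (g : PySem.Dict String (PySem.Set String)) (p : String) :
    PySem.Dict String (PySem.Set String) :=
  let parts := (PySem.Str.split? p "/").getD []   -- p.split("/"); sep "/" is nonempty so split? is `some`
  let g := (PySem.List.pyRange 1 (parts.length : Int)).foldl (pvStepA parts) g
  g.setdefault p PySem.Set.empty                  -- leaf

def collect_groups (paths : List String) : List (String × List String) :=
  (paths.foldl pvPathA PySem.Dict.empty).items

-- ===== PORT B =====
-- B is two-phase: phase 1 indexes every node with its parent; phase 2 derives the groups dict.
-- phase 1, inner step: extend the running prefix, record child -> parent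
def pvIdxStep (st : String × PySem.Dict String (Option String)) (part : String) :
    String × PySem.Dict String (Option String) :=
  let child := st.1 ++ "/" ++ part
  (child, st.2.setdefault child (some st.1))

-- phase 1, body of the outer loop over paths
def pvIndexPath (d : PySem.Dict String (Option String)) (p : String) :
    PySem.Dict String (Option String) :=
  let parts := (PySem.Str.split? p "/").getD []   -- p.split("/")
  let node := PySem.List.pyGetD parts 0 ""        -- parts[0]; split never returns an empty list
  ((PySem.List.slice parts (some 1) none).foldl pvIdxStep (node, d.setdefault node none)).2

-- phase 2, linking step: groups[par].add(s) (par, when present, is always a key of groups)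
def pvLinkStep (g : PySem.Dict String (PySem.Set String)) (e : String × Option String) :
    PySem.Dict String (PySem.Set String) :=
  match e.2 with
  | none => g
  | some a => g.modify a PySem.Set.empty (fun s => PySem.Set.add s e.1)

-- phase 2: groups = {s: set() for s in parents}, then the linking loop over parents.items()
def pvGroupsOf (parents : PySem.Dict String (Option String)) :
    PySem.Dict String (PySem.Set String) :=
  parents.items.foldl pvLinkStep
    (parents.keys.foldl (fun g s => g.insert s PySem.Set.empty) (PySem.Dict.empty : PySem.Dict String (PySem.Set String)))

def collect_groups_alt (paths : List String) : List (String × List String) :=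
  (pvGroupsOf (paths.foldl pvIndexPath PySem.Dict.empty)).items

-- ===== PRECONDITION & SPEC =====
def Spec_collect_groups (paths : List String) (out : List (String × List String)) : Prop := out = collect_groups_alt paths
instance (paths : List String) (out : List (String × List String)) : Decidable (Spec_collect_groups paths out) := by unfold Spec_collect_groups; infer_instance

-- ===== CLAIM (what is proved, stated in full; the proofs are below) =====
def Claim_equal_collect_groups : Prop := ∀ (paths : List String), Dom_collect_groups paths → Spec_collect_groups paths (collect_groups paths)

-- ===== LEMMAS AND PROOFS =====

-- ---- proof-side bridge: A's per-path interleaved pass, rewritten with a running prefix ----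
def pvStepI (st : String × PySem.Dict String (PySem.Set String)) (part : String) :
    String × PySem.Dict String (PySem.Set String) :=
  let child := st.1 ++ "/" ++ part
  (child, st.2.modify st.1 PySem.Set.empty (fun s => PySem.Set.add s child))

def pvPathI (g : PySem.Dict String (PySem.Set String)) (p : String) :
    PySem.Dict String (PySem.Set String) :=
  let parts := (PySem.Str.split? p "/").getD []
  let node := PySem.List.pyGetD parts 0 ""
  let st := (PySem.List.slice parts (some 1) none).foldl pvStepI (node, g)
  st.2.setdefault p PySem.Set.empty

-- ---- step 1: A's per-path body equals the running-prefix body pvPathI ----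

-- '/'.join over an appended last component (Chars level)
theorem pv_chars_join_append (sep q p0 : List Char) (ps : List (List Char)) :
    PySem.Chars.join sep ((p0 :: ps) ++ [q]) = PySem.Chars.join sep (p0 :: ps) ++ sep ++ q := by
  induction ps generalizing p0 with
  | nil => simp [PySem.Chars.join_cons_cons, PySem.Chars.join_singleton]
  | cons p1 ps ih =>
      have h1 := ih p1
      rw [List.cons_append] at h1
      simp only [List.cons_append, PySem.Chars.join_cons_cons, h1, List.append_assoc]

-- the same on Strings
theorem pv_str_join_append (xs : List String) (y : String) (h : xs ≠ []) :
    PySem.Str.join "/" (xs ++ [y]) = PySem.Str.join "/" xs ++ "/" ++ y := by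
  cases xs with
  | nil => exact absurd rfl h
  | cons x xs =>
      apply String.toList_inj.mp
      simp only [String.toList_append, PySem.Str.toList_join, List.map_append, List.map_cons,
        List.map_nil]
      exact pv_chars_join_append _ _ _ _

theorem pv_str_join_singleton (x : String) : PySem.Str.join "/" [x] = x := by
  apply String.toList_inj.mp
  simp [PySem.Str.toList_join, PySem.Chars.join_singleton]

-- loop invariant: the running-prefix fold over the first m-1 tail components computes
-- ('/'.join(parts[:m]), A's indexed fold over range(1, m))
theorem pv_loop_eq (cs : List String) (m : Nat) (hm : 1 ≤ m) (hmn : m ≤ cs.length)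
    (g : PySem.Dict String (PySem.Set String)) :
    ((cs.drop 1).take (m - 1)).foldl pvStepI (cs.headD "", g)
      = (PySem.Str.join "/" (cs.take m),
         (PySem.List.pyRange 1 (m : Int)).foldl (pvStepA cs) g) := by
  induction m with
  | zero => omega
  | succ k ih =>
      cases Nat.eq_or_lt_of_le hm with
      | inl h1 =>
          have hk : k = 0 := by omega
          subst hk
          have hc : cs ≠ [] := by intro h; subst h; simp at hmn
          obtain ⟨x, t, rfl⟩ := List.exists_cons_of_ne_nil hc
          simp [pv_str_join_singleton]
      | inr h1 =>
          have hk1 : 1 ≤ k := by omega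
          have hkn : k ≤ cs.length := by omega
          have hklt : k < cs.length := by omega
          have h' : k - 1 < (cs.drop 1).length := by simp; omega
          have htake : (cs.drop 1).take (k + 1 - 1) = (cs.drop 1).take (k - 1) ++ ((cs.drop 1)[k-1]'h') :: [] := by
            rw [show k + 1 - 1 = (k - 1) + 1 by omega, List.take_succ_eq_append_getElem h']
          have hgd : (cs.drop 1)[k-1]'h' = cs[k]'hklt := by
            simp only [List.getElem_drop]
            congr 1
            omega
          have hrange : PySem.List.pyRange 1 ((k + 1 : Nat) : Int)
              = PySem.List.pyRange 1 (k : Int) ++ [(k : Int)] := by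
            push_cast
            exact PySem.List.pyRange_one_succ_right (by exact_mod_cast hk1)
          rw [htake, hgd, List.foldl_append, ih hk1 hkn, hrange, List.foldl_append]
          have hjoin : PySem.Str.join "/" (cs.take (k + 1))
              = PySem.Str.join "/" (cs.take k) ++ "/" ++ cs[k]'hklt := by
            rw [List.take_succ_eq_append_getElem hklt]
            apply pv_str_join_append
            intro h
            rcases List.take_eq_nil_iff.mp h with h0 | h0
            · omega
            · rw [h0] at hklt; simp at hklt
          simp only [List.foldl_cons, List.foldl_nil, pvStepI, pvStepA]
          rw [PySem.List.slice_to cs (by positivity : (0:Int) ≤ (k:Int)),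
              show ((k : Int) + 1) = ((k + 1 : Nat) : Int) by push_cast; ring,
              PySem.List.slice_to cs (by positivity : (0:Int) ≤ ((k+1 : Nat):Int))]
          simp [hjoin]

-- the two per-path bodies agree for any split result cs
theorem pv_body_eq (g : PySem.Dict String (PySem.Set String)) (p : String) (cs : List String) :
    (((PySem.List.pyRange 1 (cs.length : Int)).foldl (pvStepA cs) g).setdefault p PySem.Set.empty)
      = ((((PySem.List.slice cs (some 1) none).foldl pvStepI
            (PySem.List.pyGetD cs 0 "", g)).2).setdefault p PySem.Set.empty) := by
  cases hnil : cs with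
  | nil => simp [PySem.List.slice]
  | cons x t =>
      rw [← hnil]
      have hlen : 1 ≤ cs.length := by rw [hnil]; simp
      have hdrop : PySem.List.slice cs (some 1) none = cs.drop 1 := by
        rw [PySem.List.slice_from cs (by norm_num : (0:Int) ≤ 1)]; norm_num
      have hget : PySem.List.pyGetD cs 0 "" = cs.headD "" := by
        rw [hnil]; simp [PySem.List.pyGetD, PySem.List.pyGet?, PySem.List.pyIdx?]
      have hfull : (cs.drop 1).take (cs.length - 1) = cs.drop 1 := by
        apply List.take_of_length_le; simp
      have h := pv_loop_eq cs cs.length hlen le_rfl g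
      rw [hfull] at h
      rw [hdrop, hget, h]

-- A's per-path step equals the running-prefix per-path step
theorem pv_path_eq (g : PySem.Dict String (PySem.Set String)) (p : String) :
    pvPathA g p = pvPathI g p := by
  simp only [pvPathA, pvPathI]
  exact pv_body_eq g p _

-- ---- step 2: characterize p.split("/") ----
def pvSplit : List Char → List (List Char)
  | [] => [[]]
  | c :: rest =>
    if c = '/' then [] :: pvSplit rest
    else match pvSplit rest with
      | [] => [[c]]
      | h :: t => (c :: h) :: t

theorem pvSplit_ne_nil (l : List Char) : pvSplit l ≠ [] := by
  cases l with
  | nil => simp [pvSplit]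
  | cons c rest =>
    simp only [pvSplit]
    split
    · simp
    · split <;> simp

theorem pv_go_spec (fuel : Nat) : ∀ (l cur : List Char) (acc : List (List Char)), l.length < fuel →
    PySem.Chars.splitOn.go ['/'] fuel l cur acc
      = acc.reverse ++ List.modifyHead (cur.reverse ++ ·) (pvSplit l) := by
  induction fuel with
  | zero => intro l cur acc h; omega
  | succ fuel ih =>
    intro l cur acc h
    cases l with
    | nil =>
      rw [PySem.Chars.splitOn.go]
      simp [pvSplit]
      omega
    | cons c rest =>
      rw [PySem.Chars.splitOn.go]
      by_cases hc : c = '/'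
      · subst hc
        have h1 : List.isPrefixOf ['/'] ('/' :: rest) = true := by simp [List.isPrefixOf]
        simp only [h1, if_pos]
        rw [ih _ _ _ (by simpa using Nat.lt_of_succ_lt_succ h)]
        simp only [pvSplit]
        rcases h2 : pvSplit rest with _ | ⟨hd, t⟩
        · exact absurd h2 (pvSplit_ne_nil rest)
        · simp [h2, List.modifyHead]
      · have h1 : List.isPrefixOf ['/'] (c :: rest) = false := by
          simp [List.isPrefixOf]
          exact fun h => absurd h.symm hc
        simp only [h1]
        rw [if_neg (by simp)]
        rw [ih _ _ _ (by simpa using Nat.lt_of_succ_lt_succ h)]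
        simp only [pvSplit, if_neg hc]
        congr 1
        rcases h2 : pvSplit rest with _ | ⟨hd, t⟩
        · exact absurd h2 (pvSplit_ne_nil rest)
        · simp [List.modifyHead]

theorem pv_splitOn_eq (l : List Char) : PySem.Chars.splitOn l ['/'] = pvSplit l := by
  rw [PySem.Chars.splitOn, pv_go_spec (l.length + 1) l [] [] (by omega)]
  rcases h : pvSplit l with _ | ⟨hd, t⟩
  · exact absurd h (pvSplit_ne_nil l)
  · simp [List.modifyHead]

theorem pvSplit_no_slash (l : List Char) : ∀ x ∈ pvSplit l, '/' ∉ x := by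
  induction l with
  | nil => simp [pvSplit]
  | cons c rest ih =>
    simp only [pvSplit]
    split
    · intro x hx
      rcases List.mem_cons.mp hx with h | h
      · simp [h]
      · exact ih x h
    · rename_i hc
      rcases h2 : pvSplit rest with _ | ⟨hd, t⟩
      · exact absurd h2 (pvSplit_ne_nil rest)
      · intro x hx
        rcases List.mem_cons.mp hx with h | h
        · subst h
          intro hmem
          rcases List.mem_cons.mp hmem with h | h
          · exact hc h.symm
          · exact ih hd (by simp [h2]) h
        · exact ih x (by rw [h2]; exact List.mem_cons_of_mem _ h)

theorem pvSplit_join (l : List Char) : PySem.Chars.join ['/'] (pvSplit l) = l := by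
  induction l with
  | nil => simp [pvSplit, PySem.Chars.join_singleton]
  | cons c rest ih =>
    simp only [pvSplit]
    split
    · rename_i hc
      rcases h2 : pvSplit rest with _ | ⟨hd, t⟩
      · exact absurd h2 (pvSplit_ne_nil rest)
      · rw [h2] at ih
        rw [PySem.Chars.join_cons_cons, ih, hc]
        simp
    · rcases h2 : pvSplit rest with _ | ⟨hd, t⟩
      · exact absurd h2 (pvSplit_ne_nil rest)
      · rw [h2] at ih
        cases t with
        | nil =>
          rw [PySem.Chars.join_singleton]
          rw [PySem.Chars.join_singleton] at ih
          rw [ih]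
        | cons t1 t2 =>
          rw [PySem.Chars.join_cons_cons]
          rw [PySem.Chars.join_cons_cons] at ih
          simp only [List.cons_append, List.append_assoc] at *
          rw [ih]

theorem pv_last_slash_unique : ∀ (a : List Char) {t a' t' : List Char}, '/' ∉ t → '/' ∉ t' →
    a ++ '/' :: t = a' ++ '/' :: t' → a = a' := by
  intro a
  induction a with
  | nil =>
    intro t a' t' ht ht' h
    cases a' with
    | nil => rfl
    | cons x a' =>
      simp only [List.nil_append, List.cons_append, List.cons.injEq] at h
      exact absurd (h.2 ▸ (by simp : '/' ∈ a' ++ '/' :: t')) ht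
  | cons x a ih =>
    intro t a' t' ht ht' h
    cases a' with
    | nil =>
      simp only [List.cons_append, List.nil_append, List.cons.injEq] at h
      exact absurd (h.2 ▸ (by simp : '/' ∈ a ++ '/' :: t)) ht'
    | cons y a' =>
      simp only [List.cons_append, List.cons.injEq] at h
      rw [h.1, ih ht ht' h.2]

-- the split-result facts, lifted to the String level
theorem pv_parts_eq (p : String) :
    (PySem.Str.split? p "/").getD [] = (pvSplit p.toList).map String.ofList := by
  have h : "/".toList = ['/'] := rfl
  simp [PySem.Str.split?, PySem.Chars.split?, h, pv_splitOn_eq]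

-- ---- step 3: dict-level lemmas ----

theorem pv_get?_mk_append_left {ν : Type} (l₁ l₂ : List (String × ν)) (a : String)
    (h : a ∈ l₁.map Prod.fst) :
    (PySem.Dict.mk (l₁ ++ l₂)).get? a = (PySem.Dict.mk l₁).get? a := by
  induction l₁ with
  | nil => simp at h
  | cons e t ih =>
    obtain ⟨k, v⟩ := e
    rw [List.cons_append, PySem.Dict.get?_mk_cons, PySem.Dict.get?_mk_cons]
    by_cases hk : (k == a) = true
    · simp [hk]
    · simp only [hk, Bool.false_eq_true, if_false]
      apply ih
      simp only [List.map_cons, List.mem_cons] at h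
      rcases h with h | h
      · exact absurd (beq_iff_eq.mpr h.symm) hk
      · exact h

theorem pv_contains_mk_append {ν : Type} (l₁ l₂ : List (String × ν)) (a : String) :
    (PySem.Dict.mk (l₁ ++ l₂)).contains a
      = ((PySem.Dict.mk l₁).contains a || (PySem.Dict.mk l₂).contains a) := by
  simp [PySem.Dict.contains_mk, List.any_append]

-- modify at a key living in the prefix commutes with a trailing fresh entry
theorem pv_mk_append_modify {ν : Type} (d : PySem.Dict String ν) (c : String) (w : ν)
    (a : String) (d0 : ν) (f : ν → ν) (ha : a ∈ d.keys) (hac : a ≠ c) :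
    (PySem.Dict.mk (d.items ++ [(c, w)])).modify a d0 f
      = PySem.Dict.mk ((d.modify a d0 f).items ++ [(c, w)]) := by
  have hmem : a ∈ d.items.map Prod.fst := ha
  have hcont : d.contains a = true := (PySem.Dict.contains_iff_mem_keys d a).mpr ha
  have hcont' : (PySem.Dict.mk (d.items ++ [(c, w)])).contains a = true := by
    rw [pv_contains_mk_append]
    simp [hcont]
  have hget : (PySem.Dict.mk (d.items ++ [(c, w)])).getD a d0 = d.getD a d0 := by
    rw [PySem.Dict.getD_eq_get?_getD, PySem.Dict.getD_eq_get?_getD,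
      pv_get?_mk_append_left _ _ _ hmem]
  rw [PySem.Dict.modify, PySem.Dict.modify, hget]
  apply PySem.Dict.ext
  rw [PySem.Dict.items_insert_of_contains _ _ hcont']
  show _ = (PySem.Dict.mk ((d.insert a (f (d.getD a d0))).items ++ [(c, w)])).items
  rw [PySem.Dict.items_insert_of_contains _ _ hcont]
  simp only [List.map_append, List.map_cons, List.map_nil]
  congr 1
  have : (c == a) = false := by
    simp only [beq_eq_false_iff_ne, ne_eq]
    exact fun h => hac h.symm
  simp [this]

-- setdefault k then modify k collapses to the modify
theorem pv_setdefault_modify {ν : Type} (d : PySem.Dict String ν) (k : String) (d0 : ν)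
    (f : ν → ν) :
    (d.setdefault k d0).modify k d0 f = d.modify k d0 f := by
  by_cases hc : d.contains k = true
  · rw [PySem.Dict.setdefault_of_contains _ _ hc]
  · rw [PySem.Dict.setdefault_of_not_contains _ _ (by simpa using hc)]
    rw [PySem.Dict.modify, PySem.Dict.modify, PySem.Dict.getD_insert_self,
      PySem.Dict.insert_insert_self, PySem.Dict.getD_of_not_contains _ _ (by simpa using hc)]

-- a modify whose function fixes the stored value is the identity
theorem pv_modify_id {ν : Type} (d : PySem.Dict String ν) (k : String) (d0 : ν) (f : ν → ν)
    (hnd : d.keys.Nodup) (hk : k ∈ d.keys) (hf : f (d.getD k d0) = d.getD k d0) :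
    d.modify k d0 f = d := by
  rw [PySem.Dict.modify, hf]
  apply PySem.Dict.ext
  rw [PySem.Dict.items_insert_of_contains _ _ ((PySem.Dict.contains_iff_mem_keys d k).mpr hk)]
  have h : ∀ p ∈ d.items, (if (p.1 == k) = true then (k, d.getD k d0) else p) = p := by
    intro p hp
    by_cases hpk : (p.1 == k) = true
    · have hk1 : p.1 = k := beq_iff_eq.mp hpk
      have hp' : (k, p.2) ∈ d.items := by rw [← hk1]; exact hp
      have hgd := PySem.Dict.getD_of_mem_items d hp' hnd d0
      rw [if_pos hpk, hgd, ← hk1]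
    · simp [hpk]
  rw [List.map_congr_left h, List.map_id']

theorem pv_keys_foldl_link (L : List (String × Option String))
    (d : PySem.Dict String (PySem.Set String))
    (hpar : ∀ e ∈ L, ∀ a, e.2 = some a → a ∈ d.keys) :
    (L.foldl pvLinkStep d).keys = d.keys := by
  induction L generalizing d with
  | nil => rfl
  | cons e t ih =>
    rw [List.foldl_cons]
    have hstep : (pvLinkStep d e).keys = d.keys := by
      unfold pvLinkStep
      cases he : e.2 with
      | none => rfl
      | some a =>
        rw [PySem.Dict.keys_modify, PySem.Dict.keys_insert_of_contains]
        exact (PySem.Dict.contains_iff_mem_keys d a).mpr (hpar e (List.mem_cons_self) a he)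
    have hpar' : ∀ e' ∈ t, ∀ a, e'.2 = some a → a ∈ (pvLinkStep d e).keys := by
      intro e' he' a ha
      rw [hstep]
      exact hpar e' (List.mem_cons_of_mem _ he') a ha
    rw [ih _ hpar', hstep]

theorem pv_foldl_link_append (L : List (String × Option String))
    (d : PySem.Dict String (PySem.Set String)) (c : String) (w : PySem.Set String)
    (hc : c ∉ d.keys) (hpar : ∀ e ∈ L, ∀ a, e.2 = some a → a ∈ d.keys) :
    L.foldl pvLinkStep (PySem.Dict.mk (d.items ++ [(c, w)]))
      = PySem.Dict.mk ((L.foldl pvLinkStep d).items ++ [(c, w)]) := by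
  induction L generalizing d with
  | nil => rfl
  | cons e t ih =>
    rw [List.foldl_cons, List.foldl_cons]
    have hkeys : ∀ a, e.2 = some a → (pvLinkStep d e).keys = d.keys := by
      intro a ha
      unfold pvLinkStep
      rw [ha]
      rw [PySem.Dict.keys_modify, PySem.Dict.keys_insert_of_contains]
      exact (PySem.Dict.contains_iff_mem_keys d a).mpr (hpar e (List.mem_cons_self) a ha)
    cases he : e.2 with
    | none =>
      have h1 : pvLinkStep (PySem.Dict.mk (d.items ++ [(c, w)])) e
          = PySem.Dict.mk (d.items ++ [(c, w)]) := by unfold pvLinkStep; rw [he]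
      have h2 : pvLinkStep d e = d := by unfold pvLinkStep; rw [he]
      rw [h1, h2]
      exact ih d hc (fun e' he' a ha => hpar e' (List.mem_cons_of_mem _ he') a ha)
    | some a =>
      have hak : a ∈ d.keys := hpar e (List.mem_cons_self) a he
      have hac : a ≠ c := fun h => hc (h ▸ hak)
      have h1 : pvLinkStep (PySem.Dict.mk (d.items ++ [(c, w)])) e
          = PySem.Dict.mk ((pvLinkStep d e).items ++ [(c, w)]) := by
        unfold pvLinkStep
        rw [he]
        exact pv_mk_append_modify d c w a _ _ hak hac
      rw [h1]
      have hk2 := hkeys a he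
      exact ih (pvLinkStep d e) (hk2 ▸ hc) (fun e' he' a' ha' => hk2 ▸ hpar e' (List.mem_cons_of_mem _ he') a' ha')

-- ---- step 4: pvGroupsOf through one appended node record ----

def pvPar (L : List (String × Option String)) : Prop :=
  ∀ e ∈ L, ∀ a, e.2 = some a → a ∈ L.map Prod.fst

theorem pv_keys_groupsOf (Q : PySem.Dict String (Option String)) (hnd : Q.keys.Nodup)
    (hpar : pvPar Q.items) : (pvGroupsOf Q).keys = Q.keys := by
  unfold pvGroupsOf
  have hkinit : (Q.keys.foldl (fun g s => g.insert s PySem.Set.empty) (PySem.Dict.empty : PySem.Dict String (PySem.Set String))).keys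
      = Q.keys := by
    rw [PySem.Dict.keys_foldl_insert (f := fun _ _ => PySem.Set.empty)]
    rw [PySem.Dict.keys_empty, PySem.Set.update_nil_left, PySem.Set.ofList_eq_self_of_nodup Q.keys hnd]
  rw [pv_keys_foldl_link Q.items _ (fun e he a ha => by
    rw [hkinit]; exact hpar e he a ha), hkinit]

-- the initialization pass {s: set() for s in parents} written out
theorem pv_init_items (Q : PySem.Dict String (Option String)) (hnd : Q.keys.Nodup) :
    (Q.keys.foldl (fun g s => g.insert s PySem.Set.empty) (PySem.Dict.empty : PySem.Dict String (PySem.Set String))).items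
      = Q.keys.map (fun s => (s, PySem.Set.empty)) := by
  have h := PySem.Dict.items_foldl_insert_fresh Q.keys (fun s => s)
    (fun _ => PySem.Set.empty) (PySem.Dict.empty : PySem.Dict String (PySem.Set String))
    (fun a _ => PySem.Dict.contains_empty a) (by simpa using hnd)
  simpa using h

-- pvGroupsOf of a node index extended by one fresh record
theorem pv_groupsOf_snoc (Q : PySem.Dict String (Option String)) (c : String)
    (o : Option String) (hnd : Q.keys.Nodup) (hfresh : c ∉ Q.keys) (hpar : pvPar Q.items)
    (ho : ∀ a, o = some a → a ∈ Q.keys) :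
    pvGroupsOf (PySem.Dict.mk (Q.items ++ [(c, o)]))
      = PySem.Dict.mk ((pvLinkStep (pvGroupsOf Q) (c, o)).items ++ [(c, PySem.Set.empty)]) := by
  have hkeys' : (PySem.Dict.mk (Q.items ++ [(c, o)])).keys = Q.keys ++ [c] := by
    simp [PySem.Dict.keys]
  have hnd' : (Q.keys ++ [c]).Nodup := by
    rw [List.nodup_append]
    refine ⟨hnd, List.nodup_singleton c, ?_⟩
    intro a ha b hb
    rw [List.mem_singleton.mp hb]
    exact fun h => hfresh (h ▸ ha)
  have hinit' : ((PySem.Dict.mk (Q.items ++ [(c, o)])).keys.foldl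
        (fun g s => g.insert s PySem.Set.empty) (PySem.Dict.empty : PySem.Dict String (PySem.Set String))).items
      = (Q.keys.foldl (fun g s => g.insert s PySem.Set.empty) (PySem.Dict.empty : PySem.Dict String (PySem.Set String))).items
        ++ [(c, PySem.Set.empty)] := by
    rw [hkeys']
    have h1 := PySem.Dict.items_foldl_insert_fresh (Q.keys ++ [c]) (fun s => s)
      (fun _ => PySem.Set.empty) (PySem.Dict.empty : PySem.Dict String (PySem.Set String))
      (fun a _ => PySem.Dict.contains_empty a) (by simpa using hnd')
    have h2 := pv_init_items Q hnd
    rw [show PySem.Dict.empty.items = ([] : List (String × PySem.Set String)) from rfl] at h1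
    simp only [List.nil_append] at h1
    rw [h1, h2]
    simp
  unfold pvGroupsOf
  have hitems : (PySem.Dict.mk (Q.items ++ [(c, o)])).items = Q.items ++ [(c, o)] := rfl
  rw [hitems, List.foldl_append]
  have hkinit : (Q.keys.foldl (fun g s => g.insert s PySem.Set.empty) (PySem.Dict.empty : PySem.Dict String (PySem.Set String))).keys
      = Q.keys := by
    rw [PySem.Dict.keys_foldl_insert (f := fun _ _ => PySem.Set.empty)]
    rw [PySem.Dict.keys_empty, PySem.Set.update_nil_left, PySem.Set.ofList_eq_self_of_nodup Q.keys hnd]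
  have hstep1 : ((PySem.Dict.mk (Q.items ++ [(c, o)])).keys.foldl
        (fun g s => g.insert s PySem.Set.empty) (PySem.Dict.empty : PySem.Dict String (PySem.Set String)))
      = PySem.Dict.mk ((Q.keys.foldl (fun g s => g.insert s PySem.Set.empty)
          PySem.Dict.empty).items ++ [(c, PySem.Set.empty)]) := by
    apply PySem.Dict.ext
    rw [hinit']
  rw [hstep1]
  rw [pv_foldl_link_append Q.items _ c PySem.Set.empty
    (by rw [hkinit]; exact hfresh)
    (by intro e he a ha; rw [hkinit]; exact hpar e he a ha)]
  rw [List.foldl_cons, List.foldl_nil]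
  cases o with
  | none =>
    have h1 : ∀ d, pvLinkStep d ((c : String), (none : Option String)) = d := fun d => rfl
    rw [h1, h1]
  | some n =>
    have hn : n ∈ Q.keys := ho n rfl
    have hnG : n ∈ (pvGroupsOf Q).keys := by rw [pv_keys_groupsOf Q hnd hpar]; exact hn
    have hnc : n ≠ c := fun h => hfresh (h ▸ hn)
    show (PySem.Dict.mk ((pvGroupsOf Q).items ++ [(c, PySem.Set.empty)])).modify n
        PySem.Set.empty (fun s => PySem.Set.add s c) = _
    rw [pv_mk_append_modify (pvGroupsOf Q) c PySem.Set.empty n PySem.Set.empty _ hnG hnc]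
    rfl

theorem pv_groupsOf_snoc_none (Q : PySem.Dict String (Option String)) (c : String)
    (hnd : Q.keys.Nodup) (hfresh : c ∉ Q.keys) (hpar : pvPar Q.items) :
    pvGroupsOf (PySem.Dict.mk (Q.items ++ [(c, none)]))
      = (pvGroupsOf Q).setdefault c PySem.Set.empty := by
  rw [pv_groupsOf_snoc Q c none hnd hfresh hpar (by simp)]
  have hcc : (pvGroupsOf Q).contains c = false := by
    rw [← Bool.not_eq_true, PySem.Dict.contains_iff_mem_keys, pv_keys_groupsOf Q hnd hpar]
    exact hfresh
  rw [PySem.Dict.setdefault_of_not_contains _ _ hcc]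
  apply PySem.Dict.ext
  rw [PySem.Dict.items_insert_of_not_contains _ _ hcc]
  rfl

theorem pv_groupsOf_snoc_some (Q : PySem.Dict String (Option String)) (c n : String)
    (hnd : Q.keys.Nodup) (hfresh : c ∉ Q.keys) (hn : n ∈ Q.keys) (hpar : pvPar Q.items) :
    pvGroupsOf (PySem.Dict.mk (Q.items ++ [(c, some n)]))
      = ((pvGroupsOf Q).modify n PySem.Set.empty (fun s => PySem.Set.add s c)).setdefault c PySem.Set.empty := by
  rw [pv_groupsOf_snoc Q c (some n) hnd hfresh hpar (by intro a ha; cases ha; exact hn)]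
  have hkeysmod : ((pvGroupsOf Q).modify n PySem.Set.empty
      (fun s => PySem.Set.add s c)).keys = (pvGroupsOf Q).keys := by
    rw [PySem.Dict.keys_modify, PySem.Dict.keys_insert_of_contains]
    rw [PySem.Dict.contains_iff_mem_keys, pv_keys_groupsOf Q hnd hpar]
    exact hn
  have hcc : ((pvGroupsOf Q).modify n PySem.Set.empty
      (fun s => PySem.Set.add s c)).contains c = false := by
    rw [← Bool.not_eq_true, PySem.Dict.contains_iff_mem_keys, hkeysmod,
      pv_keys_groupsOf Q hnd hpar]
    exact hfresh
  rw [PySem.Dict.setdefault_of_not_contains _ _ hcc]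
  apply PySem.Dict.ext
  rw [PySem.Dict.items_insert_of_not_contains _ _ hcc]
  rfl

-- ---- step 5: the invariant tying the two constructions together ----

def pvCanon (c : String) (o : Option String) : Prop :=
  match o with
  | none => '/' ∉ c.toList
  | some a => ∃ t : List Char, '/' ∉ t ∧ c.toList = a.toList ++ '/' :: t

def pvInv (Q : PySem.Dict String (Option String)) : Prop :=
  Q.keys.Nodup ∧ ∀ e ∈ Q.items, pvCanon e.1 e.2 ∧
    ∀ a, e.2 = some a → a ∈ Q.keys ∧ e.1 ∈ (pvGroupsOf Q).getD a PySem.Set.empty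

theorem pv_inv_par (Q : PySem.Dict String (Option String)) (h : pvInv Q) : pvPar Q.items := by
  intro e he a ha
  exact (h.2 e he).2 a ha |>.1

-- one combined step: record a child node on both sides
theorem pv_step_both (Q : PySem.Dict String (Option String))
    (g : PySem.Dict String (PySem.Set String)) (node part : String)
    (hsf : '/' ∉ part.toList) (hI : pvInv Q) (hk : node ∈ Q.keys)
    (hg : g.setdefault node PySem.Set.empty = pvGroupsOf Q) :
    pvInv (Q.setdefault (node ++ "/" ++ part) (some node))
    ∧ (node ++ "/" ++ part) ∈ (Q.setdefault (node ++ "/" ++ part) (some node)).keys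
    ∧ (g.modify node PySem.Set.empty (fun s => PySem.Set.add s (node ++ "/" ++ part))).setdefault
        (node ++ "/" ++ part) PySem.Set.empty
      = pvGroupsOf (Q.setdefault (node ++ "/" ++ part) (some node)) := by
  set c := node ++ "/" ++ part with hc
  have hclist : c.toList = node.toList ++ '/' :: part.toList := by
    rw [hc]
    simp [String.toList_append]
  have hslash : '/' ∈ c.toList := by
    rw [hclist]
    exact List.mem_append_right _ (List.mem_cons_self)
  have hnec : node ≠ c := by
    intro h
    have := congrArg (fun s => s.toList.length) h
    simp only [hclist, List.length_append, List.length_cons] at this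
    omega
  have hndG : (pvGroupsOf Q).keys.Nodup := by
    rw [pv_keys_groupsOf Q hI.1 (pv_inv_par Q hI)]
    exact hI.1
  have hkG : node ∈ (pvGroupsOf Q).keys := by
    rw [pv_keys_groupsOf Q hI.1 (pv_inv_par Q hI)]
    exact hk
  by_cases hcQ : c ∈ Q.keys
  · -- the node is already indexed: both sides are unchanged
    have hQ0 : Q.setdefault c (some node) = Q :=
      PySem.Dict.setdefault_of_contains _ _ ((PySem.Dict.contains_iff_mem_keys Q c).mpr hcQ)
    rw [hQ0]
    refine ⟨hI, hcQ, ?_⟩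
    -- the existing record for c carries parent node (last-slash uniqueness)
    obtain ⟨e, he, he1⟩ := List.mem_map.mp hcQ
    obtain ⟨c', o'⟩ := e
    simp only at he1
    subst he1
    have hcanon := (hI.2 _ he).1
    cases ho' : o' with
    | none =>
      rw [ho'] at hcanon
      exact absurd hslash hcanon
    | some a' =>
      rw [ho'] at hcanon
      obtain ⟨t, ht, hteq⟩ := hcanon
      have heq : a'.toList ++ '/' :: t = node.toList ++ '/' :: part.toList := by
        rw [← hteq]
        exact hclist
      have ha' : a' = node := String.toList_inj.mp (pv_last_slash_unique a'.toList ht hsf heq)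
      have h2 := (hI.2 _ he).2 a' (by rw [ho'])
      rw [ha'] at h2
      have hmem : c ∈ (pvGroupsOf Q).getD node PySem.Set.empty := h2.2
      calc (g.modify node PySem.Set.empty (fun s => PySem.Set.add s c)).setdefault c PySem.Set.empty
          = ((g.setdefault node PySem.Set.empty).modify node PySem.Set.empty
              (fun s => PySem.Set.add s c)).setdefault c PySem.Set.empty := by
            rw [pv_setdefault_modify]
        _ = ((pvGroupsOf Q).modify node PySem.Set.empty
              (fun s => PySem.Set.add s c)).setdefault c PySem.Set.empty := by rw [hg]
        _ = (pvGroupsOf Q).setdefault c PySem.Set.empty := by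
            rw [pv_modify_id _ _ _ _ hndG hkG (PySem.Set.add_of_mem hmem)]
        _ = pvGroupsOf Q := PySem.Dict.setdefault_of_contains _ _ (by
            rw [PySem.Dict.contains_iff_mem_keys, pv_keys_groupsOf Q hI.1 (pv_inv_par Q hI)]
            exact hcQ)
  · -- fresh node: the index grows by one record
    have hQ0 : Q.setdefault c (some node) = PySem.Dict.mk (Q.items ++ [(c, some node)]) := by
      have hcc : Q.contains c = false := by
        rw [← Bool.not_eq_true, PySem.Dict.contains_iff_mem_keys]
        exact hcQ
      apply PySem.Dict.ext
      rw [PySem.Dict.setdefault_of_not_contains _ _ hcc,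
        PySem.Dict.items_insert_of_not_contains _ _ hcc]
    have hG' := pv_groupsOf_snoc_some Q c node hI.1 hcQ hk (pv_inv_par Q hI)
    have hkeys' : (PySem.Dict.mk (Q.items ++ [(c, some node)])).keys = Q.keys ++ [c] := by
      simp [PySem.Dict.keys]
    have hmod : g.modify node PySem.Set.empty (fun s => PySem.Set.add s c)
        = (pvGroupsOf Q).modify node PySem.Set.empty (fun s => PySem.Set.add s c) := by
      rw [← hg, pv_setdefault_modify]
    refine ⟨?_, ?_, ?_⟩
    · -- the invariant for the extended index
      rw [hQ0]
      constructor
      · rw [hkeys']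
        rw [List.nodup_append]
        refine ⟨hI.1, List.nodup_singleton c, ?_⟩
        intro a ha b hb
        rw [List.mem_singleton.mp hb]
        exact fun h => hcQ (h ▸ ha)
      · intro e he
        have hGQ' : pvGroupsOf (PySem.Dict.mk (Q.items ++ [(c, some node)]))
            = ((pvGroupsOf Q).modify node PySem.Set.empty
                (fun s => PySem.Set.add s c)).setdefault c PySem.Set.empty := hG'
        rcases List.mem_append.mp he with he | he
        · refine ⟨(hI.2 e he).1, ?_⟩
          intro a ha
          have h2 := (hI.2 e he).2 a ha
          have hanec : a ≠ c := fun h => hcQ (h ▸ h2.1)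
          refine ⟨hkeys' ▸ List.mem_append_left _ h2.1, ?_⟩
          rw [hGQ']
          rw [PySem.Dict.getD_eq_get?_getD,
            PySem.Dict.get?_setdefault_of_ne _ _ hanec, ← PySem.Dict.getD_eq_get?_getD]
          rw [PySem.Dict.getD_modify]
          by_cases han : a = node
          · subst han
            rw [if_pos rfl]
            exact (PySem.Set.mem_add _ _ _).mpr (Or.inl h2.2)
          · rw [if_neg han]
            exact h2.2
        · rw [List.mem_singleton.mp he]
          refine ⟨⟨part.toList, hsf, hclist⟩, ?_⟩
          intro a ha
          cases ha
          refine ⟨hkeys' ▸ List.mem_append_left _ hk, ?_⟩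
          rw [hGQ']
          rw [PySem.Dict.getD_eq_get?_getD,
            PySem.Dict.get?_setdefault_of_ne _ _ hnec, ← PySem.Dict.getD_eq_get?_getD]
          rw [PySem.Dict.getD_modify, if_pos rfl]
          exact (PySem.Set.mem_add _ _ _).mpr (Or.inr rfl)
    · rw [hQ0, hkeys']
      exact List.mem_append_right _ (List.mem_singleton.mpr rfl)
    · rw [hQ0, hG', hmod]

-- the analogue for a path's root component
theorem pv_root_both (Q : PySem.Dict String (Option String)) (node : String)
    (hsf : '/' ∉ node.toList) (hI : pvInv Q) :
    pvInv (Q.setdefault node none)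
    ∧ node ∈ (Q.setdefault node none).keys
    ∧ (pvGroupsOf Q).setdefault node PySem.Set.empty = pvGroupsOf (Q.setdefault node none) := by
  by_cases hnQ : node ∈ Q.keys
  · have hQ0 : Q.setdefault node none = Q :=
      PySem.Dict.setdefault_of_contains _ _ ((PySem.Dict.contains_iff_mem_keys Q node).mpr hnQ)
    rw [hQ0]
    refine ⟨hI, hnQ, ?_⟩
    apply PySem.Dict.setdefault_of_contains
    rw [PySem.Dict.contains_iff_mem_keys, pv_keys_groupsOf Q hI.1 (pv_inv_par Q hI)]
    exact hnQ
  · have hcc : Q.contains node = false := by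
      rw [← Bool.not_eq_true, PySem.Dict.contains_iff_mem_keys]
      exact hnQ
    have hQ0 : Q.setdefault node none = PySem.Dict.mk (Q.items ++ [(node, none)]) := by
      apply PySem.Dict.ext
      rw [PySem.Dict.setdefault_of_not_contains _ _ hcc,
        PySem.Dict.items_insert_of_not_contains _ _ hcc]
    have hG' := pv_groupsOf_snoc_none Q node hI.1 hnQ (pv_inv_par Q hI)
    have hkeys' : (PySem.Dict.mk (Q.items ++ [(node, none)])).keys = Q.keys ++ [node] := by
      simp [PySem.Dict.keys]
    refine ⟨?_, ?_, ?_⟩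
    · rw [hQ0]
      constructor
      · rw [hkeys', List.nodup_append]
        refine ⟨hI.1, List.nodup_singleton node, ?_⟩
        intro a ha b hb
        rw [List.mem_singleton.mp hb]
        exact fun h => hnQ (h ▸ ha)
      · intro e he
        rcases List.mem_append.mp he with he | he
        · refine ⟨(hI.2 e he).1, ?_⟩
          intro a ha
          have h2 := (hI.2 e he).2 a ha
          have hanec : a ≠ node := fun h => hnQ (h ▸ h2.1)
          refine ⟨hkeys' ▸ List.mem_append_left _ h2.1, ?_⟩
          rw [hG']
          rw [PySem.Dict.getD_eq_get?_getD,
            PySem.Dict.get?_setdefault_of_ne _ _ hanec, ← PySem.Dict.getD_eq_get?_getD]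
          exact h2.2
        · rw [List.mem_singleton.mp he]
          exact ⟨hsf, by intro a ha; cases ha⟩
    · rw [hQ0, hkeys']
      exact List.mem_append_right _ (List.mem_singleton.mpr rfl)
    · rw [hQ0, hG']

-- the inner folds of pvPathI and pvIndexPath, advanced together
theorem pv_inner (rest : List String) (hsf : ∀ x ∈ rest, '/' ∉ x.toList) :
    ∀ (node : String) (g : PySem.Dict String (PySem.Set String))
      (Q : PySem.Dict String (Option String)), pvInv Q → node ∈ Q.keys →
      g.setdefault node PySem.Set.empty = pvGroupsOf Q →
    (rest.foldl pvStepI (node, g)).1 = (rest.foldl pvIdxStep (node, Q)).1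
    ∧ pvInv ((rest.foldl pvIdxStep (node, Q)).2)
    ∧ (rest.foldl pvIdxStep (node, Q)).1 ∈ ((rest.foldl pvIdxStep (node, Q)).2).keys
    ∧ ((rest.foldl pvStepI (node, g)).2).setdefault ((rest.foldl pvStepI (node, g)).1)
        PySem.Set.empty
      = pvGroupsOf ((rest.foldl pvIdxStep (node, Q)).2) := by
  induction rest with
  | nil =>
    intro node g Q hI hk hg
    exact ⟨rfl, hI, hk, hg⟩
  | cons part rest ih =>
    intro node g Q hI hk hg
    have hsf1 : '/' ∉ part.toList := hsf part List.mem_cons_self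
    have hsf2 : ∀ x ∈ rest, '/' ∉ x.toList := fun x hx => hsf x (List.mem_cons_of_mem _ hx)
    have hstep := pv_step_both Q g node part hsf1 hI hk hg
    simp only [List.foldl_cons]
    exact ih hsf2 (node ++ "/" ++ part)
      (g.modify node PySem.Set.empty (fun s => PySem.Set.add s (node ++ "/" ++ part)))
      (Q.setdefault (node ++ "/" ++ part) (some node)) hstep.1 hstep.2.1 hstep.2.2

-- per-path: the interleaved pass applied to pvGroupsOf Q equals pvGroupsOf of the indexed Q
theorem pv_path_phi (Q : PySem.Dict String (Option String)) (p : String) (hI : pvInv Q) :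
    pvPathI (pvGroupsOf Q) p = pvGroupsOf (pvIndexPath Q p) ∧ pvInv (pvIndexPath Q p) := by
  have hparts := pv_parts_eq p
  set cs := (PySem.Str.split? p "/").getD [] with hcs
  have hcsne : cs ≠ [] := by
    rw [hparts]
    intro h
    exact pvSplit_ne_nil p.toList (List.map_eq_nil_iff.mp h)
  have hdrop : PySem.List.slice cs (some 1) none = cs.drop 1 := by
    rw [PySem.List.slice_from cs (by norm_num : (0:Int) ≤ 1)]
    norm_num
  have hget : PySem.List.pyGetD cs 0 "" = cs.headD "" := by
    obtain ⟨x, t, h⟩ := List.exists_cons_of_ne_nil hcsne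
    rw [h]
    simp [PySem.List.pyGetD, PySem.List.pyGet?, PySem.List.pyIdx?]
  have hmem_sf : ∀ x ∈ cs, '/' ∉ x.toList := by
    intro x hx
    rw [hparts] at hx
    obtain ⟨l, hl, rfl⟩ := List.mem_map.mp hx
    rw [String.toList_ofList]
    exact pvSplit_no_slash p.toList l hl
  have hhead_sf : '/' ∉ (cs.headD "").toList :=
    hmem_sf _ (by
      obtain ⟨x, t, h⟩ := List.exists_cons_of_ne_nil hcsne
      rw [h]
      exact List.mem_cons_self)
  have htail_sf : ∀ x ∈ cs.drop 1, '/' ∉ x.toList :=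
    fun x hx => hmem_sf x (List.mem_of_mem_drop hx)
  have hjoin : PySem.Str.join "/" cs = p := by
    apply String.toList_inj.mp
    rw [PySem.Str.toList_join]
    have h1 : cs.map String.toList = pvSplit p.toList := by
      rw [hparts, List.map_map]
      simp [Function.comp_def]
    have h2 : "/".toList = ['/'] := rfl
    rw [h2, h1, pvSplit_join]
  -- the root step
  have hroot := pv_root_both Q (cs.headD "") hhead_sf hI
  -- the inner fold
  have hinner := pv_inner (cs.drop 1) htail_sf (cs.headD "") (pvGroupsOf Q)
    (Q.setdefault (cs.headD "") none) hroot.1 hroot.2.1 hroot.2.2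
  -- the running prefix ends at p
  have hfull : (cs.drop 1).take (cs.length - 1) = cs.drop 1 := by
    apply List.take_of_length_le
    simp
  have hlen : 1 ≤ cs.length := by
    obtain ⟨x, t, h⟩ := List.exists_cons_of_ne_nil hcsne
    rw [h]
    simp
  have hnode1 : ((cs.drop 1).foldl pvStepI (cs.headD "", pvGroupsOf Q)).1 = p := by
    have h := pv_loop_eq cs cs.length hlen le_rfl (pvGroupsOf Q)
    rw [hfull] at h
    rw [h, List.take_of_length_le le_rfl]
    exact hjoin
  constructor
  · simp only [pvPathI, pvIndexPath]
    rw [← hcs, hdrop, hget, ← hnode1, hinner.2.2.2]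
  · simp only [pvIndexPath]
    rw [← hcs, hdrop, hget]
    exact hinner.2.1

theorem pv_inv_empty : pvInv PySem.Dict.empty := by
  constructor
  · simp [PySem.Dict.empty, PySem.Dict.keys]
  · intro e he
    simp [PySem.Dict.empty] at he

theorem pv_groupsOf_empty : pvGroupsOf PySem.Dict.empty = PySem.Dict.empty := rfl

theorem pv_outer (paths : List String) :
    ∀ (Q : PySem.Dict String (Option String)), pvInv Q →
    paths.foldl pvPathI (pvGroupsOf Q) = pvGroupsOf (paths.foldl pvIndexPath Q)
    ∧ pvInv (paths.foldl pvIndexPath Q) := by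
  induction paths with
  | nil => intro Q hI; exact ⟨rfl, hI⟩
  | cons p ps ih =>
    intro Q hI
    have h := pv_path_phi Q p hI
    have h2 := ih (pvIndexPath Q p) h.2
    simp only [List.foldl_cons]
    rw [h.1]
    exact h2

-- ===== VERDICT (by name: the statement is the Claim_ definition above) =====
theorem collect_groups_spec : Claim_equal_collect_groups := by
  intro paths _
  unfold Spec_collect_groups collect_groups collect_groups_alt
  rw [funext (fun g => funext (fun p => pv_path_eq g p))]
  have h := pv_outer paths PySem.Dict.empty pv_inv_empty
  rw [pv_groupsOf_empty] at h
  rw [h.1]
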